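-- pv_equiv track=rewrite | github.com/jeat14/telegram-username-bot | app.py | _is_pronounceable
-- ===== SOURCE A (Python) =====
-- def _is_pronounceable(username):
--     """Basic pronounceability check"""
--     vowels = 'aeiouAEIOU'
--     consonant_streak = 0
--     vowel_streak = 0
--
--     for char in username:
--         if char.isalpha():
--             if char in vowels:
--                 vowel_streak += 1
--                 consonant_streak = 0
--                 if vowel_streak > 3:
--                     return False
--             else:
--                 consonant_streak += 1
--                 vowel_streak = 0
--                 if consonant_streak > 4:
--                     return False
--     return True
-- ===== SOURCE B (Python) =====
-- def _is_pronounceable(username):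
--     """Basic pronounceability check"""
--     vowels = set('aeiouAEIOU')
--     letters = [c for c in username if c.isalpha()]
--     runs = []
--     i = 0
--     n = len(letters)
--     while i < n:
--         j = i
--         while j < n and (letters[j] in vowels) == (letters[i] in vowels):
--             j += 1
--         runs.append((letters[i] in vowels, j - i))
--         i = j
--     return all(length <= 3 if is_vowel else length <= 4
--                for is_vowel, length in runs)
-- ===== Notes on version B (the rewrite author's own statement) =====
-- stated objective: alternative
-- what changed: B filters the username to its alphabetic characters, splits them into maximal vowel/consonant runs, and then checks each run's length against its limit, instead of A's per-character streak counters with early return.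
import Mathlib
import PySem

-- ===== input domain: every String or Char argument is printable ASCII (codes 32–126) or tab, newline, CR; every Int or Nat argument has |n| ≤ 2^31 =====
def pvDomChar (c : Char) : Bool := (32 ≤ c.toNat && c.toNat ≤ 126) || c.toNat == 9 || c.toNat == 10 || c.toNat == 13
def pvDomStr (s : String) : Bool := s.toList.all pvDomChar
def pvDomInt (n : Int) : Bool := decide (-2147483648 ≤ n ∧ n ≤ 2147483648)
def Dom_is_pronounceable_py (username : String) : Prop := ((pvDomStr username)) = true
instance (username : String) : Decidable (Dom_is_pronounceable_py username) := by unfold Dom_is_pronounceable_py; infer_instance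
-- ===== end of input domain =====

-- B replaces A's per-character vowel/consonant streak counters by a group-into-runs pass
-- over the alphabetic characters followed by a length check on each run (objective: alternative).

-- ===== PORT A =====
-- loop over the characters with the two streak counters; `return False` is modelled by
-- returning `false` immediately (the remaining iterations are skipped, as in Python)
def isPronAuxA (cs vs : Nat) : List Char → Bool
  | [] => true
  | c :: rest =>
    if PySem.Chars.isalpha c then
      -- `char in vowels` on a 1-char `char` = membership among the characters of the string
      if ("aeiouAEIOU".toList).contains c then
        if vs + 1 > 3 then false else isPronAuxA 0 (vs + 1) rest
      else
        if cs + 1 > 4 then false else isPronAuxA (cs + 1) 0 rest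
    else isPronAuxA cs vs rest

def is_pronounceable_py (username : String) : Bool :=
  isPronAuxA 0 0 username.toList

-- ===== PORT B =====
def pvIsVowel (c : Char) : Bool := ("aeiouAEIOU".toList).contains c

-- the inner while loop of Source B: split off the maximal run with the same vowel-key as the head
def pvRuns : List Char → List (Bool × Nat)
  | [] => []
  | c :: rest =>
    (pvIsVowel c, (rest.takeWhile (fun d => pvIsVowel d == pvIsVowel c)).length + 1)
      :: pvRuns (rest.dropWhile (fun d => pvIsVowel d == pvIsVowel c))
termination_by l => l.length
decreasing_by
  simp only [List.length_cons]
  exact Nat.lt_succ_of_le (List.length_dropWhile_le _ _)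

def is_pronounceable_py_alt (username : String) : Bool :=
  (pvRuns (username.toList.filter PySem.Chars.isalpha)).all
    (fun r => if r.1 then decide (r.2 ≤ 3) else decide (r.2 ≤ 4))

-- ===== PRECONDITION & SPEC =====
def Spec_is_pronounceable_py (username : String) (out : Bool) : Prop := out = is_pronounceable_py_alt username
instance (username : String) (out : Bool) : Decidable (Spec_is_pronounceable_py username out) := by unfold Spec_is_pronounceable_py; infer_instance

-- ===== CLAIM (what is proved, stated in full; the proofs are below) =====
def Claim_equal_is_pronounceable_py : Prop := ∀ (username : String), Dom_is_pronounceable_py username → Spec_is_pronounceable_py username (is_pronounceable_py username)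

-- ===== LEMMAS AND PROOFS =====

theorem pvRuns_cons (c : Char) (rest : List Char) :
    pvRuns (c :: rest) =
    (pvIsVowel c, (rest.takeWhile (fun d => pvIsVowel d == pvIsVowel c)).length + 1)
      :: pvRuns (rest.dropWhile (fun d => pvIsVowel d == pvIsVowel c)) := by
  rw [pvRuns]

-- non-alphabetic characters are transparent in A's loop
theorem isPronAuxA_filter (l : List Char) : ∀ cs vs,
    isPronAuxA cs vs l = isPronAuxA cs vs (l.filter PySem.Chars.isalpha) := by
  induction l with
  | nil => intro cs vs; rfl
  | cons c rest ih =>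
    intro cs vs
    by_cases h : PySem.Chars.isalpha c = true
    · simp only [isPronAuxA, h, List.filter_cons_of_pos h, if_true]
      split_ifs <;> first | rfl | exact ih _ _
    · simp only [Bool.not_eq_true] at h
      rw [List.filter_cons_of_neg (by simp [h])]
      simp only [isPronAuxA, h, Bool.false_eq_true, if_false]
      exact ih cs vs

-- consuming a nonempty all-vowel run
theorem isPronAuxA_vowel_run (r : List Char)
    (ha : ∀ c ∈ r, PySem.Chars.isalpha c = true) (hv : ∀ c ∈ r, pvIsVowel c = true)
    (hne : r ≠ []) : ∀ cs vs rest,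
    isPronAuxA cs vs (r ++ rest) =
      if vs + r.length > 3 then false else isPronAuxA 0 (vs + r.length) rest := by
  induction r with
  | nil => exact absurd rfl hne
  | cons c r' ih =>
    intro cs vs rest
    have hac : PySem.Chars.isalpha c = true := ha c (by simp)
    have hvc : ("aeiouAEIOU".toList).contains c = true := hv c (by simp)
    simp only [List.cons_append, isPronAuxA, hac, hvc, if_true]
    rcases r' with _ | ⟨d, r''⟩
    · simp only [List.nil_append, List.length_cons, List.length_nil]
    · rw [ih (fun x hx => ha x (by simp [hx])) (fun x hx => hv x (by simp [hx]))
        (by simp) 0 (vs + 1)]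
      simp only [List.length_cons]
      have e : vs + (r''.length + 1 + 1) = vs + 1 + (r''.length + 1) := by omega
      rw [e]
      split_ifs <;> first | rfl | omega

-- consuming a nonempty all-consonant run
theorem isPronAuxA_cons_run (r : List Char)
    (ha : ∀ c ∈ r, PySem.Chars.isalpha c = true) (hv : ∀ c ∈ r, pvIsVowel c = false)
    (hne : r ≠ []) : ∀ cs vs rest,
    isPronAuxA cs vs (r ++ rest) =
      if cs + r.length > 4 then false else isPronAuxA (cs + r.length) 0 rest := by
  induction r with
  | nil => exact absurd rfl hne
  | cons c r' ih =>
    intro cs vs rest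
    have hac : PySem.Chars.isalpha c = true := ha c (by simp)
    have hvc : ("aeiouAEIOU".toList).contains c = false := hv c (by simp)
    simp only [List.cons_append, isPronAuxA, hac, hvc, if_true, Bool.false_eq_true,
      if_false]
    rcases r' with _ | ⟨d, r''⟩
    · simp only [List.nil_append, List.length_cons, List.length_nil]
    · rw [ih (fun x hx => ha x (by simp [hx])) (fun x hx => hv x (by simp [hx]))
        (by simp) (cs + 1) 0]
      simp only [List.length_cons]
      have e : cs + (r''.length + 1 + 1) = cs + 1 + (r''.length + 1) := by omega
      rw [e]
      split_ifs <;> first | rfl | omega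

-- when the list is empty or starts with a consonant letter, the vowel-streak is irrelevant
theorem isPronAuxA_vs_indep (l : List Char)
    (h : l = [] ∨ ∃ d t, l = d :: t ∧ PySem.Chars.isalpha d = true ∧ pvIsVowel d = false) :
    ∀ vs vs', isPronAuxA 0 vs l = isPronAuxA 0 vs' l := by
  rcases h with rfl | ⟨d, t, rfl, hd, hv⟩
  · intro _ _; rfl
  · intro vs vs'
    have h2 : ("aeiouAEIOU".toList).contains d = false := hv
    simp only [Bool.eq_false_iff] at h2
    simp at h2
    simp [isPronAuxA, hd, h2]

-- when the list is empty or starts with a vowel, the consonant-streak is irrelevant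
theorem isPronAuxA_cs_indep (l : List Char)
    (h : l = [] ∨ ∃ d t, l = d :: t ∧ PySem.Chars.isalpha d = true ∧ pvIsVowel d = true) :
    ∀ cs cs', isPronAuxA cs 0 l = isPronAuxA cs' 0 l := by
  rcases h with rfl | ⟨d, t, rfl, hd, hv⟩
  · intro _ _; rfl
  · intro cs cs'
    have h2 : ("aeiouAEIOU".toList).contains d = true := hv
    simp at h2
    simp [isPronAuxA, hd, h2]

theorem dropWhile_head_not {α : Type} (p : α → Bool) (l : List α) :
    ∀ {d t}, l.dropWhile p = d :: t → p d = false := by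
  induction l with
  | nil => intro d t h; simp [List.dropWhile] at h
  | cons c rest ih =>
    intro d t h
    rw [List.dropWhile_cons] at h
    split at h
    · exact ih h
    · rename_i hpc; cases h; simpa using hpc

-- shape fact needed for the streak-reset lemmas, for an all-alpha list
theorem dropWhile_shape (c : Char) (rest : List Char)
    (ha : ∀ x ∈ rest, PySem.Chars.isalpha x = true) :
    (rest.dropWhile (fun d => pvIsVowel d == pvIsVowel c)) = [] ∨
    ∃ d t, (rest.dropWhile (fun d => pvIsVowel d == pvIsVowel c)) = d :: t ∧
      PySem.Chars.isalpha d = true ∧ pvIsVowel d = !(pvIsVowel c) := by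
  rcases hrd : rest.dropWhile (fun d => pvIsVowel d == pvIsVowel c) with _ | ⟨d, t⟩
  · exact Or.inl rfl
  · refine Or.inr ⟨d, t, rfl, ?_, ?_⟩
    · exact ha d ((List.dropWhile_sublist _).mem (by rw [hrd]; simp))
    · have := dropWhile_head_not (fun d => pvIsVowel d == pvIsVowel c) rest hrd
      simp only [beq_eq_false_iff_ne, ne_eq] at this
      cases hv : pvIsVowel c <;> cases hd : pvIsVowel d <;> simp_all

-- main lemma: on an all-alphabetic list, A's streak loop agrees with B's run check
theorem main_lemma (l : List Char) (ha : ∀ c ∈ l, PySem.Chars.isalpha c = true) :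
    isPronAuxA 0 0 l =
      (pvRuns l).all (fun r => if r.1 then decide (r.2 ≤ 3) else decide (r.2 ≤ 4)) := by
  induction l using pvRuns.induct with
  | case1 => simp [pvRuns, isPronAuxA]
  | case2 c rest ih =>
    have hsplit : c :: rest =
        (c :: rest.takeWhile (fun d => pvIsVowel d == pvIsVowel c)) ++
          rest.dropWhile (fun d => pvIsVowel d == pvIsVowel c) := by
      simp [List.takeWhile_append_dropWhile]
    have haRun : ∀ x ∈ c :: rest.takeWhile (fun d => pvIsVowel d == pvIsVowel c),
        PySem.Chars.isalpha x = true := by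
      intro x hx
      rcases List.mem_cons.1 hx with rfl | hx'
      · exact ha x (by simp)
      · exact ha x (List.mem_cons_of_mem _ ((List.takeWhile_sublist _).mem hx'))
    have hkey : ∀ x ∈ c :: rest.takeWhile (fun d => pvIsVowel d == pvIsVowel c),
        pvIsVowel x = pvIsVowel c := by
      intro x hx
      rcases List.mem_cons.1 hx with rfl | hx'
      · rfl
      · simpa using List.mem_takeWhile_imp hx'
    have haRest : ∀ x ∈ rest.dropWhile (fun d => pvIsVowel d == pvIsVowel c),
        PySem.Chars.isalpha x = true :=
      fun x hx => ha x (List.mem_cons_of_mem _ ((List.dropWhile_sublist _).mem hx))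
    have hshape := dropWhile_shape c rest (fun x hx => ha x (List.mem_cons_of_mem _ hx))
    have ihr := ih haRest
    rw [pvRuns_cons, List.all_cons]
    rcases hv : pvIsVowel c with _ | _
    case false =>
      simp only [hv] at hsplit haRun hkey haRest hshape ihr ⊢
      rw [hsplit]
      rw [isPronAuxA_cons_run _ haRun hkey (by simp)]
      simp only [List.length_cons, Nat.zero_add]
      by_cases hlen : (rest.takeWhile (fun d => pvIsVowel d == false)).length + 1 > 4
      · rw [if_pos hlen]
        have h4 : ¬ ((rest.takeWhile (fun d => pvIsVowel d == false)).length + 1 ≤ 4) := by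
          omega
        simp only [Bool.false_eq_true, if_false]
        rw [decide_eq_false h4, Bool.false_and]
      · rw [if_neg hlen]
        have hreset : isPronAuxA
            ((rest.takeWhile (fun d => pvIsVowel d == false)).length + 1) 0
            (rest.dropWhile (fun d => pvIsVowel d == false)) =
            isPronAuxA 0 0 (rest.dropWhile (fun d => pvIsVowel d == false)) := by
          apply isPronAuxA_cs_indep
          rcases hshape with h | ⟨d, t, hdt, hd, hvd⟩
          · exact Or.inl h
          · exact Or.inr ⟨d, t, hdt, hd, by simpa using hvd⟩
        rw [hreset, ihr]
        have h4 : (rest.takeWhile (fun d => pvIsVowel d == false)).length + 1 ≤ 4 := by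
          omega
        simp only [Bool.false_eq_true, if_false]
        rw [decide_eq_true h4, Bool.true_and]
    case true =>
      simp only [hv] at hsplit haRun hkey haRest hshape ihr ⊢
      rw [hsplit]
      rw [isPronAuxA_vowel_run _ haRun hkey (by simp)]
      simp only [List.length_cons, Nat.zero_add]
      by_cases hlen : (rest.takeWhile (fun d => pvIsVowel d == true)).length + 1 > 3
      · rw [if_pos hlen]
        have h3 : ¬ ((rest.takeWhile (fun d => pvIsVowel d == true)).length + 1 ≤ 3) := by
          omega
        simp only [if_true]
        rw [decide_eq_false h3, Bool.false_and]
      · rw [if_neg hlen]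
        have hreset : isPronAuxA 0
            ((rest.takeWhile (fun d => pvIsVowel d == true)).length + 1)
            (rest.dropWhile (fun d => pvIsVowel d == true)) =
            isPronAuxA 0 0 (rest.dropWhile (fun d => pvIsVowel d == true)) := by
          apply isPronAuxA_vs_indep
          rcases hshape with h | ⟨d, t, hdt, hd, hvd⟩
          · exact Or.inl h
          · exact Or.inr ⟨d, t, hdt, hd, by simpa using hvd⟩
        rw [hreset, ihr]
        have h3 : (rest.takeWhile (fun d => pvIsVowel d == true)).length + 1 ≤ 3 := by
          omega
        simp only [if_true]
        rw [decide_eq_true h3, Bool.true_and]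

-- ===== VERDICT (by name: the statement is the Claim_ definition above) =====
theorem is_pronounceable_py_spec : Claim_equal_is_pronounceable_py := by
  intro username _
  unfold Spec_is_pronounceable_py is_pronounceable_py is_pronounceable_py_alt
  rw [isPronAuxA_filter]
  exact main_lemma _ (fun c hc => List.of_mem_filter hc)
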